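-- pv_equiv track=rewrite | github.com/MykeChidi/vulnradar | vulnradar/scanners/nosql.py | _looks_like_login_form
-- ===== SOURCE A (Python) =====
-- from typing import Dict, List, Optional, Tuple
--
-- def _looks_like_login_form(inputs: List[Dict]) -> bool:
--     """
--     Heuristic: does this form look like a login form?
--
--     Checks for username/password field naming patterns.
--     """
--     field_names = [inp["name"].lower() for inp in inputs]
--     has_username = any(
--         name in field_names
--         for name in ("username", "user", "login", "email", "uid")
--     )
--     has_password = any(
--         name in field_names for name in ("password", "pass", "pwd", "passwd")
--     )
--     return has_username and has_password
-- ===== SOURCE B (Python) =====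
-- from typing import Dict, List
--
-- def _looks_like_login_form(inputs: List[Dict]) -> bool:
--     """
--     Heuristic: does this form look like a login form?
--
--     Single pass over the inputs maintaining two flags (no early exit, so
--     a malformed later input still raises exactly as in the original).
--     """
--     has_username = False
--     has_password = False
--     for inp in inputs:
--         name = inp["name"].lower()
--         if name in ("username", "user", "login", "email", "uid"):
--             has_username = True
--         if name in ("password", "pass", "pwd", "passwd"):
--             has_password = True
--     return has_username and has_password
-- ===== Notes on version B (the rewrite author's own statement) =====
-- stated objective: simpler
-- what changed: Replaces the intermediate field_names list plus two any-over-membership scans (each rescanning the whole list) with one pass over inputs that accumulates two booleans.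
import Mathlib
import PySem

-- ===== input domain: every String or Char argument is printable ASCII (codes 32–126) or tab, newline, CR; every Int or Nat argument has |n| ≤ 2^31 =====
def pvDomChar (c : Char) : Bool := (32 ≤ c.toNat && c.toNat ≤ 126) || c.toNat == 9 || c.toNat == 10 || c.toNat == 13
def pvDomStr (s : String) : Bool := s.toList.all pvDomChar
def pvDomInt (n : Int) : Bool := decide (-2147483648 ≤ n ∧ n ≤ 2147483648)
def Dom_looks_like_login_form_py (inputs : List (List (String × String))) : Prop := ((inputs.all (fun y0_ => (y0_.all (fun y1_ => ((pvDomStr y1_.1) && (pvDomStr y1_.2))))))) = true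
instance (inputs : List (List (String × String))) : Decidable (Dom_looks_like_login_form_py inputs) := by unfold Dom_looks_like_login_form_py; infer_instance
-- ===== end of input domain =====

-- ===== PORT A =====
-- B is a single-pass loop with two flags instead of A's intermediate list + two `any` scans (objective: simpler).
-- Both ports raise (Pre_ excludes) when some input dict lacks the "name" key, like the Pythons.
-- first-match lookup of key "name" in an association-list dict (Python: inp["name"]; none = KeyError)
def pvGetName? (d : List (String × String)) : Option String :=
  (d.find? (fun p => p.1 == "name")).map (·.2)

-- field_names = [inp["name"].lower() for inp in inputs]  (none if some lookup raises)
def pvFieldNames : List (List (String × String)) → Option (List String)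
  | [] => some []
  | d :: rest =>
    match pvGetName? d with
    | none => none
    | some s => (pvFieldNames rest).map (fun l => PySem.Str.lower s :: l)

def looks_like_login_form_py (inputs : List (List (String × String))) : Bool :=
  match pvFieldNames inputs with
  | none => false   -- unreachable under Pre_ (Python raises KeyError here)
  | some field_names =>
    let has_username := ["username", "user", "login", "email", "uid"].any
      (fun name => field_names.contains name)
    let has_password := ["password", "pass", "pwd", "passwd"].any
      (fun name => field_names.contains name)
    has_username && has_password

-- ===== PORT B =====
-- one loop iteration of B: look up the name, lower it, update the two flags
def pvStepB (acc : Bool × Bool) (d : List (String × String)) : Bool × Bool :=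
  match pvGetName? d with
  | none => acc   -- unreachable under Pre_ (Python raises KeyError here)
  | some s =>
    let name := PySem.Str.lower s
    (acc.1 || ["username", "user", "login", "email", "uid"].contains name,
     acc.2 || ["password", "pass", "pwd", "passwd"].contains name)

def looks_like_login_form_py_alt (inputs : List (List (String × String))) : Bool :=
  let r := inputs.foldl pvStepB (false, false)
  r.1 && r.2

-- ===== PRECONDITION & SPEC =====
-- Pre_ excludes exactly the inputs where some dict lacks the key "name": both Pythons raise KeyError there.
def Pre_looks_like_login_form_py (inputs : List (List (String × String))) : Prop :=
  ∀ d ∈ inputs, (d.find? (fun p => p.1 == "name")).isSome = true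
instance (inputs : List (List (String × String))) : Decidable (Pre_looks_like_login_form_py inputs) := by unfold Pre_looks_like_login_form_py; infer_instance

def pvWitness_looks_like_login_form_py : (List (List (String × String))) :=
  [[("name", "User")], [("name", "pwd"), ("type", "password")]]

def Spec_looks_like_login_form_py (inputs : List (List (String × String))) (out : Bool) : Prop := out = looks_like_login_form_py_alt inputs
instance (inputs : List (List (String × String))) (out : Bool) : Decidable (Spec_looks_like_login_form_py inputs out) := by unfold Spec_looks_like_login_form_py; infer_instance

-- ===== CLAIM (what is proved, stated in full; the proofs are below) =====
def Claim_equal_looks_like_login_form_py : Prop := ∀ (inputs : List (List (String × String))), Dom_looks_like_login_form_py inputs → Pre_looks_like_login_form_py inputs → Spec_looks_like_login_form_py inputs (looks_like_login_form_py inputs)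

-- ===== LEMMAS AND PROOFS =====

-- the lowered name of a dict that has the "name" key (getD only hit when the lookup succeeds)
def pvLowName (d : List (String × String)) : String :=
  PySem.Str.lower (((d.find? (fun p => p.1 == "name")).map (·.2)).getD "")

-- B's fold, started from an arbitrary accumulator, ORs the flags obtained from (false, false)
theorem pv_foldB_acc (inputs : List (List (String × String))) (a b : Bool) :
    inputs.foldl pvStepB (a, b) =
      (a || (inputs.foldl pvStepB (false, false)).1,
       b || (inputs.foldl pvStepB (false, false)).2) := by
  induction inputs generalizing a b with
  | nil => simp
  | cons d rest ih =>
    simp only [List.foldl_cons]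
    cases h : pvGetName? d with
    | none =>
      simp [pvStepB, h, ih a b]
    | some s =>
      simp only [pvStepB, h]
      rw [ih, ih (false || _)]
      simp [Bool.or_assoc]

-- under Pre_, the comprehension succeeds and yields the map of lowered names
theorem pv_fieldNames_eq (inputs : List (List (String × String)))
    (hpre : Pre_looks_like_login_form_py inputs) :
    pvFieldNames inputs = some (inputs.map pvLowName) := by
  induction inputs with
  | nil => rfl
  | cons d rest ih =>
    obtain ⟨p, hp⟩ := Option.isSome_iff_exists.mp (hpre d List.mem_cons_self)
    have hg : pvGetName? d = some p.2 := by simp [pvGetName?, hp]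
    have := ih (fun x hx => hpre x (List.mem_cons_of_mem _ hx))
    simp [pvFieldNames, hg, this, pvLowName, hp]

-- one successful step of B's fold, written as an explicit pair
theorem pvStepB_some (acc : Bool × Bool) (d : List (String × String)) (s : String)
    (h : pvGetName? d = some s) :
    pvStepB acc d =
      (acc.1 || ["username", "user", "login", "email", "uid"].contains (PySem.Str.lower s),
       acc.2 || ["password", "pass", "pwd", "passwd"].contains (PySem.Str.lower s)) := by
  simp [pvStepB, h]

-- under Pre_, a flag of B's fold is set iff some input's lowered name is in the candidate list
theorem pv_flag1 (inputs : List (List (String × String)))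
    (hpre : Pre_looks_like_login_form_py inputs) :
    ((inputs.foldl pvStepB (false, false)).1 = true ↔
      ∃ d ∈ inputs, pvLowName d ∈ ["username", "user", "login", "email", "uid"]) ∧
    ((inputs.foldl pvStepB (false, false)).2 = true ↔
      ∃ d ∈ inputs, pvLowName d ∈ ["password", "pass", "pwd", "passwd"]) := by
  induction inputs with
  | nil => simp
  | cons d rest ih =>
    obtain ⟨p, hp⟩ := Option.isSome_iff_exists.mp (hpre d List.mem_cons_self)
    have hg : pvGetName? d = some p.2 := by simp [pvGetName?, hp]
    have hlow : pvLowName d = PySem.Str.lower p.2 := by simp [pvLowName, hp]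
    obtain ⟨ih1, ih2⟩ := ih (fun x hx => hpre x (List.mem_cons_of_mem _ hx))
    rw [List.foldl_cons, pvStepB_some _ _ _ hg, pv_foldB_acc]
    simp only [Bool.false_or]
    constructor
    · simp only [Bool.or_eq_true, ih1, List.contains_eq_mem, decide_eq_true_eq]
      constructor
      · rintro (hu | ⟨x, hx, hxC⟩)
        · exact ⟨d, List.mem_cons_self, by rw [hlow]; exact hu⟩
        · exact ⟨x, List.mem_cons_of_mem _ hx, hxC⟩
      · rintro ⟨x, hx, hxC⟩
        rcases List.mem_cons.mp hx with rfl | hx2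
        · exact Or.inl (by rw [← hlow]; exact hxC)
        · exact Or.inr ⟨x, hx2, hxC⟩
    · simp only [Bool.or_eq_true, ih2, List.contains_eq_mem, decide_eq_true_eq]
      constructor
      · rintro (hu | ⟨x, hx, hxC⟩)
        · exact ⟨d, List.mem_cons_self, by rw [hlow]; exact hu⟩
        · exact ⟨x, List.mem_cons_of_mem _ hx, hxC⟩
      · rintro ⟨x, hx, hxC⟩
        rcases List.mem_cons.mp hx with rfl | hx2
        · exact Or.inl (by rw [← hlow]; exact hxC)
        · exact Or.inr ⟨x, hx2, hxC⟩

-- A's `any`-over-membership scan, on the mapped list, says the same thing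
theorem pv_any_char (inputs : List (List (String × String))) (C : List String) :
    (C.any (fun name => (inputs.map pvLowName).contains name) = true ↔
      ∃ d ∈ inputs, pvLowName d ∈ C) := by
  simp only [List.any_eq_true, List.contains_eq_mem, decide_eq_true_eq, List.mem_map]
  constructor
  · rintro ⟨n, hn, d, hd, rfl⟩; exact ⟨d, hd, hn⟩
  · rintro ⟨d, hd, hn⟩; exact ⟨pvLowName d, hn, d, hd, rfl⟩

theorem pv_main (inputs : List (List (String × String)))
    (hpre : Pre_looks_like_login_form_py inputs) :
    looks_like_login_form_py inputs = looks_like_login_form_py_alt inputs := by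
  obtain ⟨h1, h2⟩ := pv_flag1 inputs hpre
  simp only [looks_like_login_form_py, pv_fieldNames_eq inputs hpre,
    looks_like_login_form_py_alt]
  apply Bool.eq_iff_iff.mpr
  simp only [Bool.and_eq_true, pv_any_char, h1, h2]

-- ===== VERDICT (by name: the statement is the Claim_ definition above) =====
theorem looks_like_login_form_py_spec : Claim_equal_looks_like_login_form_py := by
  intro inputs _ hpre
  exact pv_main inputs hpre
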